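-- pv_equiv track=rewrite | github.com/marcoagusto/SA | Schedule_flight_bruteForce.py | schedule_flights_brute_force
-- ===== SOURCE A (Python) =====
-- import itertools
--
-- def calculate_score(schedule):
--     # Menghitung skor jadwal berdasarkan kriteria tertentu
--     # Misalnya, jumlah penerbangan yang dijadwalkan dengan sukses
--     score = 0
--     for flight in schedule:
--         if flight[1] >= score:
--             score += 1
--     return score
--
-- def schedule_flights_brute_force(flights):
--     best_schedule = []
--     best_score = -1
--
--     # Menghasilkan semua kemungkinan jadwal menggunakan permutations
--     for schedule in itertools.permutations(flights):
--         score = calculate_score(schedule)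
--
--         if score > best_score:
--             # Jika skor jadwal saat ini lebih baik dari skor terbaik sebelumnya,
--             # simpan jadwal dan skor baru sebagai yang terbaik
--             best_schedule = schedule
--             best_score = score
--
--     return best_schedule
-- ===== SOURCE B (Python) =====
-- def schedule_flights_brute_force(flights):
--     # Greedy replacement for the O(n!) brute force: the maximum achievable score
--     # is found by a sorted greedy pass; the returned schedule (the first optimal
--     # permutation in itertools order) is built position by position, taking the
--     # first remaining flight that keeps the optimum reachable.
--     def max_from(s, fs):
--         # maximum final score reachable from score s with the flights fs
--         for v in sorted(f[1] for f in fs):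
--             if v >= s:
--                 s += 1
--         return s
--
--     def build(s, rem):
--         if not rem:
--             return []
--         target = max_from(s, rem)
--         for i in range(len(rem)):
--             f = rem[i]
--             s2 = s + 1 if f[1] >= s else s
--             rest = rem[:i] + rem[i + 1:]
--             if max_from(s2, rest) == target:
--                 return [f] + build(s2, rest)
--         return rem  # unreachable: some flight always keeps the optimum reachable
--
--     return tuple(build(0, list(flights)))
-- ===== Notes on version B (the rewrite author's own statement) =====
-- stated objective: faster
-- what changed: A scores every one of the n! permutations and keeps the first best; B computes the maximum achievable score with a sorted greedy pass and builds the same (first optimal) schedule position by position, picking the first remaining flight that keeps the optimum reachable.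
import Mathlib
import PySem

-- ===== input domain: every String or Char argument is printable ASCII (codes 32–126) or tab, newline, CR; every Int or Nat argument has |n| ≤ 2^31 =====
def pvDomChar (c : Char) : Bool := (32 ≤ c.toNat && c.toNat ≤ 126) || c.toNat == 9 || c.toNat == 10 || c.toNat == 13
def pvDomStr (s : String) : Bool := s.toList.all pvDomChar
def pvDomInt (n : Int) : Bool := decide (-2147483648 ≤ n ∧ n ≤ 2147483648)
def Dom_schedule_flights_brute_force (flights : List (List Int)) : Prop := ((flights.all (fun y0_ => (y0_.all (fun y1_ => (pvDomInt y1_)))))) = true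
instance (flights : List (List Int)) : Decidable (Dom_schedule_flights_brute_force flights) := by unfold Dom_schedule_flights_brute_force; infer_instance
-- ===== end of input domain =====

-- B replaces A's brute-force scan of all permutations by a greedy construction of the same
-- (first optimal) schedule — measurably faster; equivalence is proved on flights whose rows
-- have at least 2 entries (elsewhere Python A raises IndexError).

-- ===== PORT A =====
-- flight[1]: Pre_ guarantees every flight has length ≥ 2, so the pyGetD default is never read
def calculate_score (schedule : List (List Int)) : Int :=
  schedule.foldl (fun score flight =>
    if PySem.List.pyGetD flight 1 0 ≥ score then score + 1 else score) 0

def schedule_flights_brute_force (flights : List (List Int)) : List (List Int) :=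
  ((PySem.List.permutations flights flights.length).foldl
    (fun best schedule =>
      let score := calculate_score schedule
      if score > best.2 then (schedule, score) else best)
    (([] : List (List Int)), (-1 : Int))).1

-- ===== PORT B =====
-- max_from(s, fs): greedy pass over sorted values f[1]
def pvMaxFrom (s : Int) (fs : List (List Int)) : Int :=
  (PySem.List.sorted (fs.map (fun f => PySem.List.pyGetD f 1 0)) (fun v => v) false).foldl
    (fun s v => if v ≥ s then s + 1 else s) s

-- build(s, rem): for i in range(len(rem)): first i for which taking rem[i] keeps the
-- optimum reachable (rem[:i] + rem[i+1:] is rem.eraseIdx i)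
def pvBuild (s : Int) (rem : List (List Int)) : List (List Int) :=
  if rem.isEmpty then []
  else
    let target := pvMaxFrom s rem
    let found := (List.range rem.length).find? (fun i =>
        pvMaxFrom (if PySem.List.pyGetD (rem.getD i []) 1 0 ≥ s then s + 1 else s)
          (rem.eraseIdx i) == target)
    if h : found.isSome then
      rem.getD (found.get h) [] ::
        pvBuild (if PySem.List.pyGetD (rem.getD (found.get h) []) 1 0 ≥ s then s + 1 else s)
          (rem.eraseIdx (found.get h))
    else rem
termination_by rem.length
decreasing_by
  have hi : found.get h < rem.length :=
    List.mem_range.mp (List.mem_of_find?_eq_some (Option.some_get h).symm)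
  simp only [List.length_eraseIdx]
  split
  next => omega
  next hcon => exact absurd hi hcon

def schedule_flights_brute_force_alt (flights : List (List Int)) : List (List Int) :=
  pvBuild 0 flights

-- ===== PRECONDITION & SPEC =====
-- Pre_ excludes exactly the inputs on which Python A raises IndexError: a flight with
-- fewer than 2 entries makes `flight[1]` raise inside calculate_score.
def Pre_schedule_flights_brute_force (flights : List (List Int)) : Prop :=
  ∀ f ∈ flights, 2 ≤ f.length
instance (flights : List (List Int)) : Decidable (Pre_schedule_flights_brute_force flights) := by
  unfold Pre_schedule_flights_brute_force; infer_instance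

def pvWitness_schedule_flights_brute_force : List (List Int) := [[0, 1], [2, 3], [4, 0]]

def Spec_schedule_flights_brute_force (flights : List (List Int)) (out : List (List Int)) : Prop :=
  out = schedule_flights_brute_force_alt flights
instance (flights : List (List Int)) (out : List (List Int)) : Decidable (Spec_schedule_flights_brute_force flights out) := by unfold Spec_schedule_flights_brute_force; infer_instance

-- ===== CLAIM (what is proved, stated in full; the proofs are below) =====
def Claim_equal_schedule_flights_brute_force : Prop := ∀ (flights : List (List Int)), Dom_schedule_flights_brute_force flights → Pre_schedule_flights_brute_force flights → Spec_schedule_flights_brute_force flights (schedule_flights_brute_force flights)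

-- ===== LEMMAS AND PROOFS =====

-- value of a flight, greedy step, greedy pass over a value list
def pvVal (f : List Int) : Int := PySem.List.pyGetD f 1 0
def pvStep (s v : Int) : Int := if v ≥ s then s + 1 else s
def pvSv (s : Int) (vs : List Int) : Int := vs.foldl pvStep s
def pvSrt (vs : List Int) : List Int := PySem.List.sorted vs (fun v => v) false
def pvM (s : Int) (vs : List Int) : Int := pvSv s (pvSrt vs)
-- score of a (partial) schedule, and A's fold step with an accumulated prefix
def pvSc (s : Int) (p : List (List Int)) : Int := p.foldl (fun s f => pvStep s (pvVal f)) s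
def pvAStep (pre : List (List Int)) (s : Int) :
    (List (List Int) × Int) → List (List Int) → (List (List Int) × Int) :=
  fun best p => if pvSc s p > best.2 then (pre ++ p, pvSc s p) else best

theorem pvMaxFrom_eq (s : Int) (fs : List (List Int)) : pvMaxFrom s fs = pvM s (fs.map pvVal) := rfl

-- the block of permutations that start with xs[i], as generated by PySem.List.permutations
def pvBlocks {a : Type} (xs : List a) (r : Nat) : Nat → List (List a) :=
  fun i => match xs[i]? with
  | none => []
  | some x => (PySem.List.permutations (xs.eraseIdx i) r).map (x :: ·)

-- unfolding equation of PySem.List.permutations at a successor argument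
theorem pv_permutations_succ {a : Type} (xs : List a) (r : Nat) :
    PySem.List.permutations xs (r + 1)
      = (List.range xs.length).flatMap (pvBlocks xs r) := rfl

theorem pvBlocks_eq {a : Type} (xs : List a) (r : Nat) {j : Nat} (hj : j < xs.length) :
    pvBlocks xs r j = (PySem.List.permutations (xs.eraseIdx j) r).map (xs[j] :: ·) := by
  unfold pvBlocks
  rw [List.getElem?_eq_getElem hj]

theorem pvSc_cons (s : Int) (f : List Int) (p : List (List Int)) :
    pvSc s (f :: p) = pvSc (pvStep s (pvVal f)) p := rfl

theorem pvStep_mono {s t : Int} (v : Int) (h : s ≤ t) : pvStep s v ≤ pvStep t v := by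
  unfold pvStep; split_ifs <;> omega

theorem pvStep_le (s v : Int) : s ≤ pvStep s v := by
  unfold pvStep; split_ifs <;> omega

theorem pvSv_mono {s t : Int} (vs : List Int) (h : s ≤ t) : pvSv s vs ≤ pvSv t vs := by
  induction vs generalizing s t with
  | nil => exact h
  | cons v vs ih => exact ih (pvStep_mono v h)

theorem pvSv_ge (s : Int) (vs : List Int) : s ≤ pvSv s vs := by
  induction vs generalizing s with
  | nil => exact le_rfl
  | cons v vs ih => exact le_trans (pvStep_le s v) (ih _)

theorem pvStep_swap {a b : Int} (s : Int) (h : b ≤ a) :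
    pvStep (pvStep s a) b ≤ pvStep (pvStep s b) a := by
  unfold pvStep; split_ifs <;> omega

theorem pvSv_insert (v : Int) {l : List Int} (s : Int) (hl : l.Pairwise (· ≤ ·)) :
    pvSv (pvStep s v) l ≤ pvSv s (List.orderedInsert (· ≤ ·) v l) := by
  induction l generalizing s with
  | nil => exact le_rfl
  | cons w l ih =>
    by_cases hvw : v ≤ w
    · simp only [List.orderedInsert, if_pos hvw]
      exact le_of_eq rfl
    · have hwv : w ≤ v := le_of_not_ge hvw
      simp only [List.orderedInsert, hvw, if_false]
      calc pvSv (pvStep s v) (w :: l) = pvSv (pvStep (pvStep s v) w) l := rfl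
        _ ≤ pvSv (pvStep (pvStep s w) v) l := pvSv_mono l (pvStep_swap s hwv)
        _ ≤ pvSv (pvStep s w) (List.orderedInsert (· ≤ ·) v l) := ih _ (List.Pairwise.sublist (by simp) hl)

theorem pvSrt_pairwise (vs : List Int) : (pvSrt vs).Pairwise (· ≤ ·) := by
  simpa using PySem.List.sorted_pairwise vs (fun v => v)

theorem pvSrt_eq_of (vs ys : List Int) (hp : ys.Perm vs) (hs : ys.Pairwise (· ≤ ·)) :
    pvSrt vs = ys := by
  exact List.Perm.eq_of_pairwise (fun a b _ _ h1 h2 => le_antisymm h1 h2)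
    (pvSrt_pairwise vs) hs ((PySem.List.sorted_perm vs (fun v => v) false).trans hp.symm)

theorem pvSrt_congr_perm {vs ws : List Int} (h : vs.Perm ws) : pvSrt vs = pvSrt ws := by
  exact PySem.List.sorted_eq_sorted_of_perm vs ws _ (fun a b h => h) h

theorem pvM_perm {vs ws : List Int} (s : Int) (h : vs.Perm ws) : pvM s vs = pvM s ws := by
  unfold pvM; rw [pvSrt_congr_perm h]

theorem pvSrt_cons (v : Int) (vs : List Int) :
    pvSrt (v :: vs) = List.orderedInsert (· ≤ ·) v (pvSrt vs) := by
  refine pvSrt_eq_of _ _ ?_ ?_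
  · exact (List.perm_orderedInsert _ v _).trans
      ((PySem.List.sorted_perm vs (fun v => v) false).cons v)
  · exact List.Pairwise.orderedInsert v _ (pvSrt_pairwise vs)

theorem pvM_pick_le (s v : Int) (vs : List Int) : pvM (pvStep s v) vs ≤ pvM s (v :: vs) := by
  unfold pvM
  rw [pvSrt_cons]
  exact pvSv_insert v s (pvSrt_pairwise vs)

-- generic: x :: xs.eraseIdx i ~ xs when xs[i] = x
theorem pv_perm_cons_eraseIdx {α : Type} {x : α} : ∀ (xs : List α) (i : Nat),
    xs[i]? = some x → (x :: xs.eraseIdx i).Perm xs := by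
  intro xs
  induction xs with
  | nil => intro i h; simp at h
  | cons a l ih =>
    intro i h
    cases i with
    | zero =>
      simp at h
      subst h
      simp [List.eraseIdx]
    | succ i =>
      simp only [List.getElem?_cons_succ] at h
      exact (List.Perm.swap a x (l.eraseIdx i)).trans ((ih i h).cons a)

theorem pvM_min {vs : List Int} {m : Int} {t : List Int} (s : Int) (h : pvSrt vs = m :: t)
    {i : Nat} (hi : vs[i]? = some m) :
    pvM s vs = pvM (pvStep s m) (vs.eraseIdx i) := by
  have hperm1 : (m :: vs.eraseIdx i).Perm vs := pv_perm_cons_eraseIdx vs i hi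
  have hperm2 : (m :: t).Perm vs := h ▸ PySem.List.sorted_perm vs (fun v => v) false
  have hti : t.Perm (vs.eraseIdx i) := (hperm2.trans hperm1.symm).cons_inv
  have hts : t.Pairwise (· ≤ ·) := by
    have := pvSrt_pairwise vs
    rw [h] at this
    exact this.of_cons
  have hsrt : pvSrt (vs.eraseIdx i) = t := pvSrt_eq_of _ _ hti hts
  unfold pvM
  rw [h, hsrt]
  rfl

-- C1: taking any flight next cannot raise the reachable optimum
theorem pv_pick_le (s : Int) (rem : List (List Int)) {i : Nat} (hi : i < rem.length) :
    pvMaxFrom (pvStep s (pvVal (rem.getD i []))) (rem.eraseIdx i) ≤ pvMaxFrom s rem := by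
  rw [pvMaxFrom_eq, pvMaxFrom_eq]
  have hmap : (rem.eraseIdx i).map pvVal = (rem.map pvVal).eraseIdx i :=
    (List.eraseIdx_map pvVal rem i).symm
  have hgd : rem.getD i [] = rem[i] := List.getD_eq_getElem rem [] hi
  have hsome : (rem.map pvVal)[i]? = some (pvVal rem[i]) := by
    simp [List.getElem?_eq_getElem hi]
  have hperm : (pvVal rem[i] :: (rem.map pvVal).eraseIdx i).Perm (rem.map pvVal) :=
    pv_perm_cons_eraseIdx _ i hsome
  rw [hmap, hgd]
  calc pvM (pvStep s (pvVal rem[i])) ((rem.map pvVal).eraseIdx i)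
      ≤ pvM s (pvVal rem[i] :: (rem.map pvVal).eraseIdx i) := pvM_pick_le _ _ _
    _ = pvM s (rem.map pvVal) := pvM_perm s hperm

-- C2: some flight keeps the optimum reachable
theorem pv_pick_exists (s : Int) (rem : List (List Int)) (hne : rem ≠ []) :
    ∃ i ∈ List.range rem.length,
      pvMaxFrom (pvStep s (pvVal (rem.getD i []))) (rem.eraseIdx i) = pvMaxFrom s rem := by
  have hvs : rem.map pvVal ≠ [] := by simpa using hne
  obtain ⟨m, t, h⟩ : ∃ m t, pvSrt (rem.map pvVal) = m :: t := by
    cases hs : pvSrt (rem.map pvVal) with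
    | nil => exact absurd ((PySem.List.sorted_eq_nil_iff _ _ _).mp hs) hvs
    | cons m t => exact ⟨m, t, rfl⟩
  have hm : m ∈ rem.map pvVal := by
    have hmem : m ∈ pvSrt (rem.map pvVal) := by rw [h]; simp
    exact (PySem.List.sorted_perm _ _ _).mem_iff.mp hmem
  obtain ⟨i, hilt, hival⟩ := List.mem_iff_getElem.mp hm
  have hlen : i < rem.length := by simpa using hilt
  refine ⟨i, List.mem_range.mpr hlen, ?_⟩
  have hgd : pvVal (rem.getD i []) = m := by
    rw [List.getD_eq_getElem rem [] hlen]
    simpa using hival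
  rw [pvMaxFrom_eq, pvMaxFrom_eq, hgd]
  have hsome : (rem.map pvVal)[i]? = some m := by
    rw [List.getElem?_eq_getElem hilt, hival]
  have hmap : (rem.eraseIdx i).map pvVal = (rem.map pvVal).eraseIdx i :=
    (List.eraseIdx_map pvVal rem i).symm
  rw [hmap]
  exact (pvM_min s h hsome).symm

-- C3: no permutation beats the sorted-greedy optimum
theorem pv_score_le : ∀ (r : Nat) (rem : List (List Int)), rem.length = r →
    ∀ p ∈ PySem.List.permutations rem r, ∀ s : Int, pvSc s p ≤ pvMaxFrom s rem := by
  intro r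
  induction r with
  | zero =>
    intro rem hlen p hp s
    rw [PySem.List.permutations_zero] at hp
    simp at hp; subst hp
    have hr : rem = [] := List.length_eq_zero_iff.mp hlen
    subst hr
    exact le_rfl
  | succ r ih =>
    intro rem hlen p hp s
    rw [pv_permutations_succ] at hp
    obtain ⟨i, hir, hpi⟩ := List.mem_flatMap.mp hp
    have hi : i < rem.length := List.mem_range.mp hir
    rw [pvBlocks_eq rem r hi] at hpi
    obtain ⟨q, hq, rfl⟩ := List.mem_map.mp hpi
    have hlen' : (rem.eraseIdx i).length = r := by
      simp [List.length_eraseIdx, hi]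
      omega
    have h2 := ih (rem.eraseIdx i) hlen' q hq (pvStep s (pvVal rem[i]))
    have h3 := pv_pick_le s rem hi
    rw [List.getD_eq_getElem rem [] hi] at h3
    exact le_trans h2 h3

-- fold over items that never beat the accumulator keeps it
theorem pv_fold_stay (pre : List (List Int)) (s : Int) (b : List (List Int)) (v : Int)
    (ps : List (List (List Int))) (h : ∀ p ∈ ps, pvSc s p ≤ v) :
    ps.foldl (pvAStep pre s) (b, v) = (b, v) := by
  induction ps with
  | nil => rfl
  | cons p ps ih =>
    have hp : ¬ pvSc s p > v := not_lt.mpr (h p (by simp))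
    simp only [List.foldl_cons, pvAStep, hp, if_false]
    exact ih (fun q hq => h q (by simp [hq]))

theorem pv_fold_bound (pre : List (List Int)) (s T : Int) (ps : List (List (List Int))) :
    ∀ (b : List (List Int)) (v : Int), v < T → (∀ p ∈ ps, pvSc s p < T) →
    (ps.foldl (pvAStep pre s) (b, v)).2 < T := by
  induction ps with
  | nil => intro b v hv _; exact hv
  | cons p ps ih =>
    intro b v hv h
    simp only [List.foldl_cons, pvAStep]
    split
    · exact ih _ _ (h p (by simp)) (fun q hq => h q (by simp [hq]))
    · exact ih _ _ hv (fun q hq => h q (by simp [hq]))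

theorem pvBuild_nil (s : Int) : pvBuild s [] = [] := by
  rw [pvBuild.eq_def]
  rfl

-- later blocks never beat an accumulator already holding the optimum
theorem pv_blocks_stay (r : Nat) (rem : List (List Int)) (s : Int) (pre : List (List Int)) :
    ∀ (js : List Nat), (∀ j ∈ js, j < rem.length ∧ (rem.eraseIdx j).length = r) →
    ∀ (X : List (List Int)),
      js.foldl (fun acc j => (pvBlocks rem r j).foldl (pvAStep pre s) acc)
        (X, pvMaxFrom s rem) = (X, pvMaxFrom s rem) := by
  intro js
  induction js with
  | nil => intro _ X; rfl
  | cons j js ih =>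
    intro hjs X
    obtain ⟨hj, hlen'⟩ := hjs j (by simp)
    simp only [List.foldl_cons, pvBlocks_eq rem r hj]
    rw [pv_fold_stay]
    · exact ih (fun k hk => hjs k (by simp [hk])) X
    · intro q hq
      obtain ⟨p, hp, rfl⟩ := List.mem_map.mp hq
      have h2 := pv_score_le r (rem.eraseIdx j) hlen' p hp (pvStep s (pvVal rem[j]))
      have h3 := pv_pick_le s rem hj
      rw [List.getD_eq_getElem rem [] hj] at h3
      exact le_trans h2 h3

-- MAIN: A's fold over all permutations = greedy construction, with accumulated prefix
theorem pv_main : ∀ (r : Nat) (rem : List (List Int)), rem.length = r →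
    ∀ (s : Int) (pre b : List (List Int)) (v : Int), v < pvMaxFrom s rem →
    (PySem.List.permutations rem r).foldl (pvAStep pre s) (b, v)
      = (pre ++ pvBuild s rem, pvMaxFrom s rem) := by
  intro r
  induction r with
  | zero =>
    intro rem hlen s pre b v hv
    have hr : rem = [] := List.length_eq_zero_iff.mp hlen
    subst hr
    rw [PySem.List.permutations_zero]
    have hM : pvMaxFrom s ([] : List (List Int)) = s := rfl
    rw [hM] at hv
    simp only [List.foldl_cons, List.foldl_nil, pvAStep]
    rw [if_pos (show pvSc s ([] : List (List Int)) > (b, v).2 from hv)]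
    rw [show pvSc s ([] : List (List Int)) = s from rfl, hM, pvBuild_nil]
  | succ r ih =>
    intro rem hlen s pre b v hv
    rw [pv_permutations_succ, List.foldl_flatMap]
    have H : ∀ (is : List Nat), (∀ i ∈ is, i < rem.length) →
        (∃ j ∈ is, (pvMaxFrom (pvStep s (pvVal (rem.getD j []))) (rem.eraseIdx j)
            == pvMaxFrom s rem) = true) →
        ∀ (b : List (List Int)) (v : Int), v < pvMaxFrom s rem →
        ∃ i, is.find? (fun j => pvMaxFrom (pvStep s (pvVal (rem.getD j []))) (rem.eraseIdx j)
            == pvMaxFrom s rem) = some i ∧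
          is.foldl (fun acc j => (pvBlocks rem r j).foldl (pvAStep pre s) acc) (b, v)
            = (pre ++ (rem.getD i [] ::
                pvBuild (pvStep s (pvVal (rem.getD i []))) (rem.eraseIdx i)), pvMaxFrom s rem) := by
      intro is
      induction is with
      | nil => intro _ hex; simp at hex
      | cons j js ihs =>
        intro his hex b0 v0 hv0
        have hj : j < rem.length := his j (by simp)
        have hgd : rem.getD j [] = rem[j] := List.getD_eq_getElem rem [] hj
        have hlen' : (rem.eraseIdx j).length = r := by
          simp [List.length_eraseIdx, hj]
          omega
        have hfoldmap : ∀ acc : List (List Int) × Int,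
            ((PySem.List.permutations (rem.eraseIdx j) r).map (rem[j] :: ·)).foldl
                (pvAStep pre s) acc
              = (PySem.List.permutations (rem.eraseIdx j) r).foldl
                  (pvAStep (pre ++ [rem[j]]) (pvStep s (pvVal rem[j]))) acc := by
          intro acc
          rw [List.foldl_map]
          congr 1
          funext acc' p
          simp only [pvAStep, pvSc_cons]
          rw [List.append_cons]
        by_cases hfeas : pvMaxFrom (pvStep s (pvVal (rem.getD j []))) (rem.eraseIdx j)
            = pvMaxFrom s rem
        · have hfeas' : pvMaxFrom (pvStep s (pvVal rem[j])) (rem.eraseIdx j)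
              = pvMaxFrom s rem := by rw [← hgd]; exact hfeas
          have hmain := ih (rem.eraseIdx j) hlen' (pvStep s (pvVal rem[j]))
            (pre ++ [rem[j]]) b0 v0 (by rw [hfeas']; exact hv0)
          rw [hfeas'] at hmain
          refine ⟨j, List.find?_cons_of_pos (by simp only [beq_iff_eq]; exact hfeas), ?_⟩
          simp only [List.foldl_cons, pvBlocks_eq rem r hj]
          rw [hfoldmap, hmain, pv_blocks_stay r rem s pre js
            (fun k hk => ⟨(his k (by simp [hk])),
              by have := his k (by simp [hk]); simp [List.length_eraseIdx, this]; omega⟩)]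
          rw [hgd]
          simp
        · have hle := pv_pick_le s rem hj
          have hlt : pvMaxFrom (pvStep s (pvVal (rem.getD j []))) (rem.eraseIdx j)
              < pvMaxFrom s rem := lt_of_le_of_ne hle hfeas
          have hex' : ∃ k ∈ js, (pvMaxFrom (pvStep s (pvVal (rem.getD k []))) (rem.eraseIdx k)
              == pvMaxFrom s rem) = true := by
            obtain ⟨k, hk, hkp⟩ := hex
            rcases List.mem_cons.mp hk with rfl | hk'
            · exact absurd (by simpa using hkp) hfeas
            · exact ⟨k, hk', hkp⟩
          simp only [List.foldl_cons, pvBlocks_eq rem r hj]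
          rw [hfoldmap]
          have hacc2 : ((PySem.List.permutations (rem.eraseIdx j) r).foldl
              (pvAStep (pre ++ [rem[j]]) (pvStep s (pvVal rem[j]))) (b0, v0)).2
                < pvMaxFrom s rem := by
            apply pv_fold_bound _ _ _ _ _ _ hv0
            intro p hp
            have h2 := pv_score_le r (rem.eraseIdx j) hlen' p hp (pvStep s (pvVal rem[j]))
            rw [hgd] at hlt
            exact lt_of_le_of_lt h2 hlt
          obtain ⟨i0, hfind, heq⟩ := ihs (fun k hk => his k (by simp [hk])) hex' _ _ hacc2
          refine ⟨i0, ?_, heq⟩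
          rw [List.find?_cons_of_neg (by simp only [beq_iff_eq]; exact hfeas)]
          exact hfind
    have hne : rem ≠ [] := by intro h; rw [h] at hlen; simp at hlen
    have hexists : ∃ j ∈ List.range rem.length,
        (pvMaxFrom (pvStep s (pvVal (rem.getD j []))) (rem.eraseIdx j)
          == pvMaxFrom s rem) = true := by
      obtain ⟨i, hir, hieq⟩ := pv_pick_exists s rem hne
      exact ⟨i, hir, by simpa using hieq⟩
    obtain ⟨i0, hfind, heq⟩ := H (List.range rem.length)
      (fun i h => List.mem_range.mp h) hexists b v hv
    have hbuild : pvBuild s rem = rem.getD i0 [] ::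
        pvBuild (pvStep s (pvVal (rem.getD i0 []))) (rem.eraseIdx i0) := by
      have hfind' : (List.range rem.length).find? (fun i =>
          pvMaxFrom (if PySem.List.pyGetD (rem.getD i []) 1 0 ≥ s then s + 1 else s)
            (rem.eraseIdx i) == pvMaxFrom s rem) = some i0 := hfind
      rw [pvBuild.eq_def]
      rw [if_neg (by simp [hne])]
      dsimp only
      rw [hfind']
      rfl
    rw [hbuild]
    exact heq

theorem pv_calc_eq (p : List (List Int)) : calculate_score p = pvSc 0 p := rfl

-- ===== VERDICT (by name: the statement is the Claim_ definition above) =====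
theorem schedule_flights_brute_force_spec : Claim_equal_schedule_flights_brute_force := by
  intro flights _ _
  unfold Spec_schedule_flights_brute_force schedule_flights_brute_force
    schedule_flights_brute_force_alt
  have hstep : (fun (best : List (List Int) × Int) (schedule : List (List Int)) =>
      let score := calculate_score schedule
      if score > best.2 then (schedule, score) else best) = pvAStep [] 0 := by
    funext best p
    simp [pvAStep, pv_calc_eq]
  have hge : (-1 : Int) < pvMaxFrom 0 flights := by
    have h0 := pvSv_ge 0 (pvSrt (flights.map pvVal))
    rw [pvMaxFrom_eq]; unfold pvM; omega
  rw [hstep, pv_main flights.length flights rfl 0 [] [] (-1) hge]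
  simp
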